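-- pv_equiv track=rewrite | github.com/laiawinnerson/Program-Persamaan-Linear | Source Code/Main.py | jenis_solusi
-- ===== SOURCE A (Python) =====
-- def jenis_solusi(matriks): #2
--     solusi_unik  = False
--     solusi_tak_terbatas = False
--     solusi_tak_ada = False
--
--     m = len(matriks) - 1 #baris
--     n = len(matriks[m]) #kolom
--
--     for i in range(n) :
--         if matriks[m][i] == 0 :
--             solusi_unik = False
--             solusi_tak_terbatas = True
--
--             if i == n-1 :
--                 solusi_tak_ada = False
--                 break
--
--             solusi_tak_ada = True
--
--         else :
--             if i < n-1 :
--                 solusi_unik = True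
--                 solusi_tak_terbatas = False
--                 solusi_tak_ada = False
--                 break
--
--             solusi_tak_terbatas = False
--
--             if i == n-1 :
--                 solusi_tak_ada = True
--                 break
--
--             solusi_tak_ada = False
--
--     return solusi_unik, solusi_tak_terbatas, solusi_tak_ada
-- ===== SOURCE B (Python) =====
-- def jenis_solusi(matriks):
--     row = matriks[-1]
--     n = len(row)
--     if n == 0:
--         return (False, False, False)
--     zeros = row.count(0)
--     if zeros == n:
--         return (False, True, False)
--     if zeros == n - 1 and row[-1] != 0:
--         return (False, False, True)
--     return (True, False, False)
-- ===== Notes on version B (the rewrite author's own statement) =====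
-- stated objective: alternative
-- what changed: Replaces A's stateful early-exit index loop with an arithmetic classification by the zero count of the last row: zeros==n means infinite, zeros==n-1 with nonzero constant means no solution, anything else means a nonzero coefficient exists and the system is unique.
import Mathlib
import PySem

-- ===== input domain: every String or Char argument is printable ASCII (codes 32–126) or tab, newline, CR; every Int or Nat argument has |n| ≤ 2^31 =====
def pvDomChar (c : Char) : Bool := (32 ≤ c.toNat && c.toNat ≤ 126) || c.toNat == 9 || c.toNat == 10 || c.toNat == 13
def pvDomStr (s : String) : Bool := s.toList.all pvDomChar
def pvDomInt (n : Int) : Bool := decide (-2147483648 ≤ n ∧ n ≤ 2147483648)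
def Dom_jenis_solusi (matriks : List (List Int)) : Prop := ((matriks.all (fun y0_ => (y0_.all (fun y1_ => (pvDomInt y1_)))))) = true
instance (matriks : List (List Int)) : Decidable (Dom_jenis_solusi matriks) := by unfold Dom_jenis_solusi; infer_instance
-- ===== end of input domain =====

-- B replaces A's single stateful flag-juggling index loop by an arithmetic classification
-- from the zero count of the last row (same cost; Pre_ excludes the empty matrix, on which
-- both Pythons raise IndexError).


-- ===== PORT A =====
-- the for-loop over range(n) with its three flags and breaks; a break returns immediately
def jenisLoopA (row : List Int) (n : Int) : List Int → Bool → Bool → Bool → Bool × Bool × Bool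
  | [], u, t, a => (u, t, a)
  | i :: rest, u, _t, _a =>
    if PySem.List.pyGetD row i 0 = 0 then
      if i = n - 1 then (false, true, false)
      else jenisLoopA row n rest false true true
    else
      if i < n - 1 then (true, false, false)
      else if i = n - 1 then (u, false, true)
      else jenisLoopA row n rest u false false

-- matriks[m] is in range whenever matriks ≠ [] (Pre_), so the total pyGetD is exact there
def jenis_solusi (matriks : List (List Int)) : Bool × Bool × Bool :=
  let m : Int := PySem.List.len matriks - 1
  let row := PySem.List.pyGetD matriks m []
  let n : Int := PySem.List.len row
  jenisLoopA row n (PySem.List.pyRange 0 n 1) false false false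

-- ===== PORT B =====
-- matriks[-1] and row[-1] are in range when used (Pre_ / n ≠ 0), so the total pyGetD is exact
def jenis_solusi_alt (matriks : List (List Int)) : Bool × Bool × Bool :=
  let row := PySem.List.pyGetD matriks (-1) []
  let n : Int := PySem.List.len row
  if n = 0 then (false, false, false)
  else
    let zeros : Int := (PySem.List.count row 0 : Int)
    if zeros = n then (false, true, false)
    else if zeros = n - 1 ∧ PySem.List.pyGetD row (-1) 0 ≠ 0 then (false, false, true)
    else (true, false, false)

-- ===== PRECONDITION & SPEC =====
-- Pre_ excludes only the empty matrix, on which A raises IndexError (matriks[-1] via matriks[m])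
def Pre_jenis_solusi (matriks : List (List Int)) : Prop := matriks ≠ []
instance (matriks : List (List Int)) : Decidable (Pre_jenis_solusi matriks) := by unfold Pre_jenis_solusi; infer_instance
def pvWitness_jenis_solusi : List (List Int) := [[0, 0, 3]]
def Spec_jenis_solusi (matriks : List (List Int)) (out : Bool × Bool × Bool) : Prop := out = jenis_solusi_alt matriks
instance (matriks : List (List Int)) (out : Bool × Bool × Bool) : Decidable (Spec_jenis_solusi matriks out) := by unfold Spec_jenis_solusi; infer_instance

-- ===== CLAIM (what is proved, stated in full; the proofs are below) =====
def Claim_equal_jenis_solusi : Prop := ∀ (matriks : List (List Int)), Dom_jenis_solusi matriks → Pre_jenis_solusi matriks → Spec_jenis_solusi matriks (jenis_solusi matriks)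

-- ===== LEMMAS AND PROOFS =====

-- the loop, started at index pre.length after an all-zero prefix pre, classifies the suffix:
-- a nonzero coefficient gives unique, else the constant decides infinite vs none
lemma loopA_char (row pre suf : List Int) (hrow : row = pre ++ suf) (hsuf : suf ≠ [])
    (t a : Bool) :
    jenisLoopA row (row.length : Int) (PySem.List.pyRange (pre.length : Int) (row.length : Int) 1) false t a =
      (if suf.dropLast.any (fun c => decide (c ≠ 0)) then (true, false, false)
       else if suf.getLast hsuf = 0 then (false, true, false) else (false, false, true)) := by
  induction suf generalizing pre t a with
  | nil => exact absurd rfl hsuf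
  | cons c rest ih =>
    have hlen : (pre.length : Int) < (row.length : Int) := by
      subst hrow; simp only [List.length_append, List.length_cons]; push_cast; omega
    rw [PySem.List.pyRange_one_cons hlen]
    have hget : PySem.List.pyGetD row (pre.length : Int) 0 = c := by
      simp [PySem.List.pyGetD_natCast, hrow, List.getD]
    simp only [jenisLoopA]
    rw [hget]
    by_cases hc : c = 0
    · rw [if_pos hc]
      rcases rest with _ | ⟨d, rest'⟩
      · have hlast : (pre.length : Int) = (row.length : Int) - 1 := by
          subst hrow; simp only [List.length_append, List.length_cons, List.length_nil]; push_cast; omega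
        rw [if_pos hlast]
        simp [hc]
      · have hnl : ¬ (pre.length : Int) = (row.length : Int) - 1 := by
          subst hrow; simp only [List.length_append, List.length_cons]; push_cast; omega
        rw [if_neg hnl]
        have hih := ih (pre ++ [c]) (by simp [hrow]) (by simp) true true
        simp only [List.length_append, List.length_cons, List.length_nil] at hih
        push_cast at hih
        rw [hih]
        simp [hc]
    · rw [if_neg hc]
      rcases rest with _ | ⟨d, rest'⟩
      · have hlast : (pre.length : Int) = (row.length : Int) - 1 := by
          subst hrow; simp only [List.length_append, List.length_cons, List.length_nil]; push_cast; omega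
        have hnlt : ¬ (pre.length : Int) < (row.length : Int) - 1 := by
          subst hrow; simp only [List.length_append, List.length_cons, List.length_nil]; push_cast; omega
        rw [if_neg hnlt, if_pos hlast]
        simp [hc]
      · have hlt : (pre.length : Int) < (row.length : Int) - 1 := by
          subst hrow; simp only [List.length_append, List.length_cons]; push_cast; omega
        rw [if_pos hlt]
        simp [hc]

-- B's zero count agrees with the coefficients/constant classification
lemma count_classify (row : List Int) (h : row ≠ []) :
    jenis_solusi_alt [row] =
      (if row.dropLast.any (fun c => decide (c ≠ 0)) then (true, false, false)
       else if row.getLast h = 0 then (false, true, false) else (false, false, true)) := by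
  have hrowget : PySem.List.pyGetD [row] (-1) ([] : List Int) = row := by
    simp [PySem.List.pyGetD, PySem.List.pyGet?, PySem.List.pyIdx?]
  have hsplit := List.dropLast_append_getLast h
  have hcnt : row.count 0 = row.dropLast.count 0 + (if row.getLast h = 0 then 1 else 0) := by
    conv_lhs => rw [← hsplit]
    rw [List.count_append]
    congr 1
    by_cases hk : row.getLast h = 0 <;> simp [hk, List.count_cons]
  have hlen : row.length = row.dropLast.length + 1 := by
    conv_lhs => rw [← hsplit]
    simp
  have hle : row.dropLast.count 0 ≤ row.dropLast.length := List.count_le_length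
  have hlastget : PySem.List.pyGetD row (-1) 0 = row.getLast h := by
    have hp : 0 < row.length := List.length_pos_of_ne_nil h
    rw [PySem.List.pyGetD_neg_ofNat row 1 0 (by omega) (by omega)]
    simp [List.getLast_eq_getElem, List.getD_eq_getElem?_getD, List.getElem?_eq_getElem (by omega : row.length - 1 < row.length)]
  simp only [jenis_solusi_alt, hrowget]
  have hn0 : ¬ PySem.List.len row = 0 := by
    simp only [PySem.List.len_eq]
    intro hh
    exact h (List.length_eq_zero_iff.mp (by exact_mod_cast hh))
  rw [if_neg hn0]
  simp only [PySem.List.len_eq, PySem.List.count_eq, hlastget]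
  by_cases hany : (row.dropLast.any fun c => decide (c ≠ 0)) = true
  · rw [if_pos hany]
    obtain ⟨x, hx, hxne⟩ := List.any_eq_true.mp hany
    simp only [decide_eq_true_eq] at hxne
    have hlt : row.dropLast.count 0 < row.dropLast.length := by
      rcases lt_or_eq_of_le hle with h' | h'
      · exact h'
      · exact absurd ((List.count_eq_length.mp h') x hx).symm hxne
    by_cases hk : row.getLast h = 0
    · rw [if_neg (by rw [hcnt, hlen]; simp [hk]; omega),
        if_neg (by push_neg; intro _; simp [hk])]
    · rw [if_neg (by rw [hcnt, hlen]; simp [hk]; omega),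
        if_neg (by rw [hcnt, hlen]; simp [hk]; push_neg; intro hc; omega)]
  · rw [if_neg hany]
    have hall : ∀ x ∈ row.dropLast, x = 0 := by
      intro x hx
      by_contra hxne
      exact hany (List.any_eq_true.mpr ⟨x, hx, by simpa using hxne⟩)
    have hceq : row.dropLast.count 0 = row.dropLast.length :=
      List.count_eq_length.mpr (fun b hb => (hall b hb).symm)
    by_cases hk : row.getLast h = 0
    · rw [if_pos hk, if_pos (by rw [hcnt, hlen, hceq]; simp [hk])]
    · rw [if_neg hk,
        if_neg (by rw [hcnt, hlen, hceq]; simp [hk]),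
        if_pos ⟨by rw [hcnt, hlen, hceq]; simp [hk], hk⟩]

theorem jenis_solusi_spec : Claim_equal_jenis_solusi := by
  intro matriks _ hpre
  have hlp : 0 < matriks.length := List.length_pos_of_ne_nil hpre
  have hidx : PySem.List.len matriks - 1 = ((matriks.length - 1 : Nat) : Int) := by
    simp only [PySem.List.len_eq]; omega
  have hrow : PySem.List.pyGetD matriks (PySem.List.len matriks - 1) [] =
      PySem.List.pyGetD matriks (-1) [] := by
    rw [hidx, PySem.List.pyGetD_natCast,
      PySem.List.pyGetD_neg_ofNat matriks 1 [] (by omega) (by omega),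
      List.getD_eq_getElem _ _ (by omega)]
  unfold Spec_jenis_solusi
  have hbrow : jenis_solusi_alt matriks = jenis_solusi_alt [PySem.List.pyGetD matriks (-1) []] := by
    simp only [jenis_solusi_alt]
    have : PySem.List.pyGetD [PySem.List.pyGetD matriks (-1) []] (-1) ([] : List Int) =
        PySem.List.pyGetD matriks (-1) [] := by
      simp [PySem.List.pyGetD, PySem.List.pyGet?, PySem.List.pyIdx?]
    rw [this]
  rw [hbrow]
  simp only [jenis_solusi, hrow]
  set row := PySem.List.pyGetD matriks (-1) [] with hr
  by_cases h : row = []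
  · simp [h, PySem.List.len_eq, PySem.List.pyRange_one_eq_nil, jenisLoopA, jenis_solusi_alt,
      PySem.List.pyGetD, PySem.List.pyGet?, PySem.List.pyIdx?]
  · have hch := loopA_char row [] row rfl h false false
    simp only [List.length_nil, Nat.cast_zero, PySem.List.len_eq] at hch ⊢
    rw [hch, count_classify row h]
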